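-- pv_equiv track=rewrite | github.com/nikunjpanchal22/code_clone_classification | python_t1_t2_full/Gpt_false_pair_3122.py | extendedString
-- ===== SOURCE A (Python) =====
-- def extendedString(string1, string2) :
-- 	x = string1
-- 	y = string2
-- 	z = ""
-- 	if len(x) == len(y) :
-- 		return "".join(i for j in zip(string1, string2) for i in j)
-- 	elif len(x) < len(y) :
-- 		x = x + x [- 1] * (len(y) - len(x))
-- 		return extendedString(x, y)
-- 	else :
-- 		y = y + y [- 1] * (len(x) - len(y))
-- 		return extendedString(x, y)
-- ===== SOURCE B (Python) =====
-- def extendedString(string1, string2):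
--     n = max(len(string1), len(string2))
--     chars = []
--     for i in range(n):
--         chars.append(string1[min(i, len(string1) - 1)])
--         chars.append(string2[min(i, len(string2) - 1)])
--     return "".join(chars)
-- ===== Notes on version B (the rewrite author's own statement) =====
-- stated objective: simpler
-- what changed: Replaces A's pad-a-copy-then-recurse-then-zip scheme with a single non-recursive loop over range(max(len1,len2)) using clamped indexing min(i, len-1), building no padded strings.
import Mathlib
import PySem

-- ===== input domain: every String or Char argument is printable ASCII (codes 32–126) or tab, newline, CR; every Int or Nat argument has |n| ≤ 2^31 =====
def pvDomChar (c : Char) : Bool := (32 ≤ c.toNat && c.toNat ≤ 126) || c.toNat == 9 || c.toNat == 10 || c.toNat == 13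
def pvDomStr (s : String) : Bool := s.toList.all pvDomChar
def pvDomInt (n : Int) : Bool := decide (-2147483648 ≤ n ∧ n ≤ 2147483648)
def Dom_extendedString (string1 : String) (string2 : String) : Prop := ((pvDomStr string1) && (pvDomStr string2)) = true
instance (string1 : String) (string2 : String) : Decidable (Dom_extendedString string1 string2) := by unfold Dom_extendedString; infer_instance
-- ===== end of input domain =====

-- B changes the decomposition: one clamped-index loop instead of A's pad-then-recurse-then-zip; return values only.

-- ===== PORT A =====
-- A pads the shorter string with copies of its last char, recurses, and when the
-- lengths agree interleaves via zip.  x[-1] on an empty string raises IndexError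
-- in Python; the port returns [] there (excluded by Pre_).
def extAgo : Nat → List Char → List Char → List Char
  | 0, _, _ => []
  | fuel+1, x, y =>
    if x.length = y.length then
      (x.zip y).flatMap (fun p => [p.1, p.2])
    else if x.length < y.length then
      match PySem.List.pyGet? x (-1) with
      | some c => extAgo fuel (x ++ List.replicate (y.length - x.length) c) y
      | none => []
    else
      match PySem.List.pyGet? y (-1) with
      | some c => extAgo fuel x (y ++ List.replicate (x.length - y.length) c)
      | none => []

-- the recursion pads once and terminates; the fuel is a generous bound on its depth
def extendedString (string1 : String) (string2 : String) : String :=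
  String.mk (extAgo (string1.toList.length + string2.toList.length + 2)
    string1.toList string2.toList)

-- ===== PORT B =====
-- single loop over range(n), clamped index min(i, len-1) on each string
def extBstep (a : List Char) (i : Nat) : Char :=
  (PySem.List.pyGet? a (min (i : Int) ((a.length : Int) - 1))).getD ' '

def extendedString_alt (string1 : String) (string2 : String) : String :=
  String.mk ((List.range (max string1.toList.length string2.toList.length)).foldl
    (fun acc i => acc ++ [extBstep string1.toList i, extBstep string2.toList i]) [])

-- ===== PRECONDITION & SPEC =====
-- Pre_ excludes exactly the inputs where A raises IndexError (exactly one string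
-- empty: x[-1] on the empty string); B raises IndexError there too.
def Pre_extendedString (string1 : String) (string2 : String) : Prop :=
  (string1 = "" ∧ string2 = "") ∨ (string1 ≠ "" ∧ string2 ≠ "")
instance (string1 : String) (string2 : String) : Decidable (Pre_extendedString string1 string2) := by
  unfold Pre_extendedString; infer_instance

def pvWitness_extendedString : String × String := ("ab", "xyz")

def Spec_extendedString (string1 : String) (string2 : String) (out : String) : Prop :=
  out = extendedString_alt string1 string2
instance (string1 : String) (string2 : String) (out : String) : Decidable (Spec_extendedString string1 string2 out) := by
  unfold Spec_extendedString; infer_instance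

-- ===== CLAIM (what is proved, stated in full; the proofs are below) =====
def Claim_equal_extendedString : Prop := ∀ (string1 : String) (string2 : String), Dom_extendedString string1 string2 → Pre_extendedString string1 string2 → Spec_extendedString string1 string2 (extendedString string1 string2)

-- ===== LEMMAS AND PROOFS =====

-- B's fold as a flatMap over the range
theorem extBfold_eq_flatMap (a b : List Char) (n : Nat) :
    (List.range n).foldl (fun acc i => acc ++ [extBstep a i, extBstep b i]) [] =
    (List.range n).flatMap (fun i => [extBstep a i, extBstep b i]) := by
  simpa using PySem.List.foldl_append_eq_flatMap (fun i => [extBstep a i, extBstep b i])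
    (List.range n) []

-- clamped lookup on a nonempty list, in range
theorem extBstep_lt (a : List Char) (i : Nat) (h : i < a.length) :
    extBstep a i = a[i] := by
  unfold extBstep
  rw [show min (i : Int) ((a.length : Int) - 1) = (i : Int) by omega]
  simp [h]

-- clamped lookup past the end: the last element
theorem extBstep_ge (a : List Char) (i : Nat) (ha : a ≠ []) (h : a.length ≤ i) :
    extBstep a i = a[a.length - 1]'(by have := List.length_pos_iff.mpr ha; omega) := by
  unfold extBstep
  have hl : 0 < a.length := List.length_pos_iff.mpr ha
  rw [show min (i : Int) ((a.length : Int) - 1) = ((a.length - 1 : Nat) : Int) by omega]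
  simp [PySem.List.pyGet?_natCast, List.getElem?_eq_getElem (by omega : a.length - 1 < a.length)]

-- equal-length case: zip-interleave equals the range flatMap of clamped lookups
theorem zip_interleave_eq (a b : List Char) (hab : a.length = b.length) :
    (a.zip b).flatMap (fun p => [p.1, p.2]) =
    (List.range a.length).flatMap (fun i => [extBstep a i, extBstep b i]) := by
  have hmap : (a.zip b).map (fun p => [p.1, p.2]) =
      (List.range a.length).map (fun i => [extBstep a i, extBstep b i]) := by
    have hlen : (a.zip b).length = a.length := by simp [List.length_zip, hab]
    apply List.ext_getElem
    · simp [hlen]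
    · intro i h1 h2
      have hi' : i < a.length := by simpa [hlen] using h1
      simp only [List.getElem_map, List.getElem_range]
      rw [extBstep_lt a i hi', extBstep_lt b i (by omega)]
      simp [List.getElem_zip]
  rw [List.flatMap_def, List.flatMap_def, hmap]

-- padding does not change the clamped lookup
theorem extBstep_pad (a : List Char) (c : Char) (k i : Nat) (ha : a ≠ [])
    (hc : c = a[a.length - 1]'(by have := List.length_pos_iff.mpr ha; omega)) :
    extBstep (a ++ List.replicate k c) i = extBstep a i := by
  have hl : 0 < a.length := List.length_pos_iff.mpr ha
  by_cases h : i < a.length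
  · rw [extBstep_lt a i h, extBstep_lt _ i (by simp; omega)]
    rw [List.getElem_append_left h]
  · rw [Nat.not_lt] at h
    rw [extBstep_ge a i ha h]
    by_cases h2 : i < a.length + k
    · rw [extBstep_lt _ i (by simp; omega)]
      rw [List.getElem_append_right h]
      simp [hc]
    · rw [Nat.not_lt] at h2
      rw [extBstep_ge _ i (by simp [ha]) (by simp; omega)]
      have : (a ++ List.replicate k c).length - 1 = a.length + k - 1 := by simp
      by_cases hk : k = 0
      · subst hk; simp
      · rw [List.getElem_append_right (by simp; omega)]
        simp [hc]

-- the main lemma: for two nonempty lists A's recursion computes B's loop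
theorem extAgo_eq (k : Nat) (a b : List Char) (ha : a ≠ []) (hb : b ≠ []) :
    extAgo (k + 2) a b = (List.range (max a.length b.length)).flatMap
      (fun i => [extBstep a i, extBstep b i]) := by
  have hla : 0 < a.length := List.length_pos_iff.mpr ha
  have hlb : 0 < b.length := List.length_pos_iff.mpr hb
  rcases Nat.lt_trichotomy a.length b.length with hlt | heq | hgt
  · -- a shorter: A pads a and recurses once into the equal-length case
    have hget : PySem.List.pyGet? a (-1) = some (a[a.length - 1]'(by omega)) := by
      rw [PySem.List.pyGet?_neg_one, List.getLast?_eq_getElem?]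
      simp [List.getElem?_eq_getElem (by omega : a.length - 1 < a.length)]
    rw [extAgo]
    rw [if_neg (by omega), if_pos hlt, hget]
    dsimp only
    set a' := a ++ List.replicate (b.length - a.length) (a[a.length - 1]'(by omega)) with ha'
    have hlen' : a'.length = b.length := by simp [ha']; omega
    rw [extAgo]
    rw [if_pos hlen', zip_interleave_eq a' b hlen', hlen',
        show max a.length b.length = b.length by omega]
    apply List.flatMap_congr
    intro i _
    rw [ha', extBstep_pad a _ _ i ha rfl]
  · rw [extAgo]
    rw [if_pos heq, zip_interleave_eq a b heq,
        show max a.length b.length = a.length by omega]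
  · -- b shorter
    have hget : PySem.List.pyGet? b (-1) = some (b[b.length - 1]'(by omega)) := by
      rw [PySem.List.pyGet?_neg_one, List.getLast?_eq_getElem?]
      simp [List.getElem?_eq_getElem (by omega : b.length - 1 < b.length)]
    rw [extAgo]
    rw [if_neg (by omega), if_neg (by omega), hget]
    dsimp only
    set b' := b ++ List.replicate (a.length - b.length) (b[b.length - 1]'(by omega)) with hb'
    have hlen' : b'.length = a.length := by simp [hb']; omega
    rw [extAgo]
    rw [if_pos hlen'.symm, zip_interleave_eq a b' hlen'.symm,
        show max a.length b.length = a.length by omega]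
    apply List.flatMap_congr
    intro i _
    rw [hb', extBstep_pad b _ _ i hb rfl]

-- ===== VERDICT (by name: the statement is the Claim_ definition above) =====
theorem extendedString_spec : Claim_equal_extendedString := by
  intro s1 s2 _ hpre
  unfold Spec_extendedString extendedString extendedString_alt
  rcases hpre with ⟨h1, h2⟩ | ⟨h1, h2⟩
  · subst h1; subst h2
    rw [extAgo]
    simp
  · have ha : s1.toList ≠ [] := by
      intro h; exact h1 (String.toList_inj.mp (by simpa using h))
    have hb : s2.toList ≠ [] := by
      intro h; exact h2 (String.toList_inj.mp (by simpa using h))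
    rw [extBfold_eq_flatMap, show s1.toList.length + s2.toList.length + 2 = (s1.toList.length + s2.toList.length) + 2 from rfl, extAgo_eq _ _ _ ha hb]
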